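-- pv_equiv track=rewrite | github.com/volcengine/verl | atropos/environments/intern_bootcamp/internbootcamp_lib/internbootcamp/bootcamp/ccaptainmarmot/ccaptainmarmot.py | _is_valid_square
-- ===== SOURCE A (Python) =====
-- from itertools import combinations
--
-- def _is_valid_square(points):
--     # Calculate all pairwise squared distances
--     dists = []
--     for (x1, y1), (x2, y2) in combinations(points, 2):
--         dist_sq = (x2-x1)**2 + (y2-y1)**2
--         dists.append(dist_sq)
--
--     # Verify square properties: 2 distinct distances (sides and diagonals)
--     dists.sort()
--     return (
--         len(dists) == 6 and
--         dists[0] == dists[1] == dists[2] == dists[3] and  # 4 equal sides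
--         dists[4] == dists[5] and                          # 2 equal diagonals
--         dists[4] == 2 * dists[0] and                      # Diagonal = side*sqrt(2)
--         dists[0] > 0                                      # Non-degenerate
--     )
-- ===== SOURCE B (Python) =====
-- def _is_valid_square(points):
--     # Geometric test instead of the six-distance histogram: try the three
--     # pairings of the four points into two diagonals; it is a square iff some
--     # pairing gives diagonals that bisect each other, are perpendicular,
--     # have equal length, and are non-degenerate.
--     if len(points) != 4:
--         return False
--     p, q, r, s = points
--
--     def ok(a, b, c, d):
--         # (a,b) and (c,d) are the candidate diagonals
--         ux, uy = b[0] - a[0], b[1] - a[1]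
--         wx, wy = d[0] - c[0], d[1] - c[1]
--         return (
--             a[0] + b[0] == c[0] + d[0] and a[1] + b[1] == c[1] + d[1]  # same midpoint
--             and ux * wx + uy * wy == 0                                  # perpendicular
--             and ux * ux + uy * uy == wx * wx + wy * wy                  # equal length
--             and (ux, uy) != (0, 0)                                      # non-degenerate
--         )
--
--     return ok(p, q, r, s) or ok(p, r, q, s) or ok(p, s, q, r)
-- ===== Notes on version B (the rewrite author's own statement) =====
-- stated objective: alternative
-- what changed: B replaces the six-pairwise-distance histogram entirely: after an up-front length-4 test it tries the three pairings of the four points into two candidate diagonals and accepts iff some pairing gives diagonals that share their midpoint, are perpendicular, have equal length and are non-degenerate (the classical diagonal characterisation of a square).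
import Mathlib
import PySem

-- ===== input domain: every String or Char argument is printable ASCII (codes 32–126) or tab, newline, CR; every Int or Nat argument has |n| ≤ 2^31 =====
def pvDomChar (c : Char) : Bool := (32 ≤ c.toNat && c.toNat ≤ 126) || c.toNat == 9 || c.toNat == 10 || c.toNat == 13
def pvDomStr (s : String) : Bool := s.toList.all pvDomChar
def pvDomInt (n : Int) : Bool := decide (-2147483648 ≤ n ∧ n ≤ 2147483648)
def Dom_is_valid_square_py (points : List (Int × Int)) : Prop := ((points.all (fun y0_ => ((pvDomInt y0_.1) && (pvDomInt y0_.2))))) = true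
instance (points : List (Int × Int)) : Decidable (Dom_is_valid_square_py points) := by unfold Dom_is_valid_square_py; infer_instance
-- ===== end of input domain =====

-- B drops the six-distance histogram and instead tests the three pairings of the four
-- points into two diagonals (same midpoint, perpendicular, equal, non-degenerate): an
-- alternative algorithm of similar cost, not claimed faster.


-- ===== PORT A =====
-- itertools.combinations(points, 2) in iteration order
def pvCombs2 {α : Type} : List α → List (α × α)
  | [] => []
  | x :: xs => (xs.map (fun y => (x, y))) ++ pvCombs2 xs

-- squared distances of all pairs (A's 'for … in combinations' loop)
def pvDists (points : List (Int × Int)) : List Int :=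
  (pvCombs2 points).map (fun p => (p.2.1 - p.1.1) ^ 2 + (p.2.2 - p.1.2) ^ 2)

def is_valid_square_py (points : List (Int × Int)) : Bool :=
  let dists := pvDists points
  let ds := PySem.List.sorted dists (fun x => x)
  -- dists[i]; only read under the len == 6 guard, exactly as Python's 'and' short-circuits
  let g := fun (i : Int) => (PySem.List.pyGet? ds i).getD 0
  decide (ds.length = 6) &&
    (g 0 == g 1 && g 1 == g 2 && g 2 == g 3) &&
    (g 4 == g 5) &&
    (g 4 == 2 * g 0) &&
    decide (g 0 > 0)

-- ===== PORT B =====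
-- Source B's ok(a,b,c,d): (a,b) and (c,d) are the candidate diagonals
def pvOk (a b c d : Int × Int) : Bool :=
  let ux := b.1 - a.1
  let uy := b.2 - a.2
  let wx := d.1 - c.1
  let wy := d.2 - c.2
  (a.1 + b.1 == c.1 + d.1) && (a.2 + b.2 == c.2 + d.2) &&
  (ux * wx + uy * wy == 0) &&
  (ux * ux + uy * uy == wx * wx + wy * wy) &&
  !(ux == 0 && uy == 0)

def is_valid_square_py_alt (points : List (Int × Int)) : Bool :=
  match points with
  | [p, q, r, s] => pvOk p q r s || pvOk p r q s || pvOk p s q r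
  | _ => false

-- ===== PRECONDITION & SPEC =====
def Spec_is_valid_square_py (points : List (Int × Int)) (out : Bool) : Prop := out = is_valid_square_py_alt points
instance (points : List (Int × Int)) (out : Bool) : Decidable (Spec_is_valid_square_py points out) := by unfold Spec_is_valid_square_py; infer_instance

-- ===== CLAIM (what is proved, stated in full; the proofs are below) =====
def Claim_equal_is_valid_square_py : Prop := ∀ (points : List (Int × Int)), Dom_is_valid_square_py points → Spec_is_valid_square_py points (is_valid_square_py points)

-- ===== LEMMAS AND PROOFS =====

-- squared distance between two points
def d2 (p q : Int × Int) : Int := (q.1 - p.1) ^ 2 + (q.2 - p.2) ^ 2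

theorem d2_comm (p q : Int × Int) : d2 p q = d2 q p := by unfold d2; ring

theorem pvCombs2_length {α : Type} (l : List α) :
    2 * (pvCombs2 l).length = l.length * (l.length - 1) := by
  induction l with
  | nil => simp [pvCombs2]
  | cons x xs ih =>
    simp only [pvCombs2, List.length_append, List.length_map, List.length_cons,
      Nat.add_sub_cancel]
    cases hx : xs.length with
    | zero =>
      rw [hx] at ih
      simp at ih
      simp [ih]
    | succ k =>
      rw [hx] at ih
      simp only [Nat.add_sub_cancel] at ih
      nlinarith [ih]

theorem pvDists_length (points : List (Int × Int)) :
    2 * (pvDists points).length = points.length * (points.length - 1) := by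
  simpa [pvDists] using pvCombs2_length points

theorem pvDists_len6_iff (points : List (Int × Int)) :
    (pvDists points).length = 6 ↔ points.length = 4 := by
  have h := pvDists_length points
  constructor
  · intro h6
    rw [h6] at h
    set n := points.length with hn
    by_contra hne
    rcases Nat.lt_or_ge n 5 with h5 | h5
    · interval_cases n <;> omega
    · have h1 : 4 ≤ n - 1 := by omega
      have := Nat.mul_le_mul h5 h1
      omega
  · intro h4; rw [h4] at h; omega

-- the sorted positional check equals the min/max/count check on any 6-element list
theorem core_check (l : List Int) (hl : l.length = 6) :
    ((let ds := PySem.List.sorted l (fun x => x)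
      let g := fun (i : Int) => (PySem.List.pyGet? ds i).getD 0
      decide (ds.length = 6) &&
        (g 0 == g 1 && g 1 == g 2 && g 2 == g 3) &&
        (g 4 == g 5) &&
        (g 4 == 2 * g 0) &&
        decide (g 0 > 0)) =
     (let s := (PySem.List.min? l (fun x => x)).getD 0
      let d := (PySem.List.max? l (fun x => x)).getD 0
      decide (s > 0) && (d == 2 * s) &&
        (PySem.List.count l s == 4) && (PySem.List.count l d == 2))) := by
  have hperm : (PySem.List.sorted l (fun x => x)).Perm l := PySem.List.sorted_perm l _ _
  have hlen : (PySem.List.sorted l (fun x => x)).length = 6 := by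
    rw [PySem.List.length_sorted, hl]
  have hpw : (PySem.List.sorted l (fun x => x)).Pairwise (fun a b => a ≤ b) :=
    PySem.List.sorted_pairwise l _
  obtain ⟨a, b, c, d, e, f, hds⟩ :
      ∃ a b c d e f, PySem.List.sorted l (fun x => x) = [a, b, c, d, e, f] := by
    match hsd : PySem.List.sorted l (fun x => x), hlen' : hlen with
    | [a, b, c, d, e, f], _ => exact ⟨a, b, c, d, e, f, rfl⟩
  rw [hds] at hperm hpw
  have hord : a ≤ b ∧ b ≤ c ∧ c ≤ d ∧ d ≤ e ∧ e ≤ f := by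
    simp [List.pairwise_cons] at hpw
    omega
  have hne : l ≠ [] := by intro h; rw [h] at hl; simp at hl
  obtain ⟨m, hm⟩ : ∃ m, PySem.List.min? l (fun x => x) = some m := by
    cases hmm : PySem.List.min? l (fun x => x) with
    | none => exact absurd ((PySem.List.min?_eq_none_iff _ _).mp hmm) hne
    | some m => exact ⟨m, rfl⟩
  obtain ⟨M, hM⟩ : ∃ M, PySem.List.max? l (fun x => x) = some M := by
    cases hmm : PySem.List.max? l (fun x => x) with
    | none => exact absurd ((PySem.List.max?_eq_none_iff _ _).mp hmm) hne
    | some M => exact ⟨M, rfl⟩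
  have hma : m = a := by
    have hmem : m ∈ l := PySem.List.min?_mem hm
    have hmin : ∀ y ∈ l, m ≤ y := PySem.List.min?_isMin hm
    have ha_mem : a ∈ l := hperm.mem_iff.mp (by simp)
    have h1 : m ≤ a := hmin a ha_mem
    have h2 : a ≤ m := by
      have hm6 : m ∈ ([a, b, c, d, e, f] : List Int) := hperm.mem_iff.mpr hmem
      simp at hm6
      rcases hm6 with h | h | h | h | h | h <;> omega
    omega
  have hMf : M = f := by
    have hmem : M ∈ l := PySem.List.max?_mem hM
    have hmax : ∀ y ∈ l, y ≤ M := PySem.List.max?_isMax hM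
    have hf_mem : f ∈ l := hperm.mem_iff.mp (by simp)
    have h1 : f ≤ M := hmax f hf_mem
    have h2 : M ≤ f := by
      have hm6 : M ∈ ([a, b, c, d, e, f] : List Int) := hperm.mem_iff.mpr hmem
      simp at hm6
      rcases hm6 with h | h | h | h | h | h <;> omega
    omega
  have hcount : ∀ v : Int, PySem.List.count l v = List.count v [a, b, c, d, e, f] := by
    intro v
    simp [PySem.List.count_eq, hperm.count_eq]
  have g0 : (PySem.List.pyGet? [a, b, c, d, e, f] (0 : Int)).getD 0 = a := by
    simp [PySem.List.pyGet?, PySem.List.pyIdx?]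
  have g1 : (PySem.List.pyGet? [a, b, c, d, e, f] (1 : Int)).getD 0 = b := by
    simp [PySem.List.pyGet?, PySem.List.pyIdx?]
  have g2 : (PySem.List.pyGet? [a, b, c, d, e, f] (2 : Int)).getD 0 = c := by
    simp [PySem.List.pyGet?, PySem.List.pyIdx?]
  have g3 : (PySem.List.pyGet? [a, b, c, d, e, f] (3 : Int)).getD 0 = d := by
    simp [PySem.List.pyGet?, PySem.List.pyIdx?]
  have g4 : (PySem.List.pyGet? [a, b, c, d, e, f] (4 : Int)).getD 0 = e := by
    simp [PySem.List.pyGet?, PySem.List.pyIdx?]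
  have g5 : (PySem.List.pyGet? [a, b, c, d, e, f] (5 : Int)).getD 0 = f := by
    simp [PySem.List.pyGet?, PySem.List.pyIdx?]
  rw [hds, hm, hM, hma, hMf]
  rw [Bool.eq_iff_iff]
  simp only [Option.getD_some, g0, g1, g2, g3, g4, g5, hcount, List.count_cons, List.count_nil,
    Bool.and_eq_true, beq_iff_eq, decide_eq_true_eq, List.length_cons, List.length_nil]
  obtain ⟨h1, h2, h3, h4, h5⟩ := hord
  constructor
  · rintro ⟨⟨⟨⟨-, ⟨hab, hbc⟩, hcd⟩, hef⟩, he2a⟩, ha0⟩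
    subst hab; subst hbc; subst hcd; subst hef
    refine ⟨⟨⟨ha0, by omega⟩, ?_⟩, ?_⟩ <;> · split_ifs <;> omega
  · rintro ⟨⟨⟨ha0, hf2a⟩, hca⟩, hcf⟩
    have hfa : a < f := by omega
    have hb : b = a := by
      by_contra hb
      rw [if_neg (show ¬(f = a) by omega), if_neg (show ¬(e = a) by omega),
        if_neg (show ¬(d = a) by omega), if_neg (show ¬(c = a) by omega),
        if_neg (show ¬(b = a) by omega), if_pos trivial] at hca
      omega
    have hc : c = a := by
      by_contra hc
      rw [hb, if_neg (show ¬(f = a) by omega), if_neg (show ¬(e = a) by omega),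
        if_neg (show ¬(d = a) by omega), if_neg (show ¬(c = a) by omega),
        if_pos (rfl : a = a), if_pos trivial] at hca
      omega
    have hd : d = a := by
      by_contra hd
      rw [hb, hc, if_neg (show ¬(f = a) by omega), if_neg (show ¬(e = a) by omega),
        if_neg (show ¬(d = a) by omega), if_pos (rfl : a = a), if_pos trivial] at hca
      omega
    have he : e = f := by
      by_contra he
      rw [if_pos trivial, if_neg (show ¬(e = f) by omega), if_neg (show ¬(d = f) by omega),
        if_neg (show ¬(c = f) by omega), if_neg (show ¬(b = f) by omega),
        if_neg (show ¬(a = f) by omega)] at hcf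
      omega
    refine ⟨⟨⟨⟨trivial, ⟨?_, ?_⟩, ?_⟩, ?_⟩, ?_⟩, ?_⟩ <;> omega

-- no nonzero integer solution of 7·s² = 4·k² (descent)
theorem no7nat : ∀ s : ℕ, ∀ k : ℕ, s ≠ 0 → 7 * s ^ 2 ≠ 4 * k ^ 2 := by
  intro s
  induction s using Nat.strong_induction_on with
  | _ s ih =>
    intro k hs h
    have hp : Nat.Prime 7 := by norm_num
    have h7k : 7 ∣ k := by
      apply hp.dvd_of_dvd_pow (n := 2)
      have hd : 7 ∣ 4 * k ^ 2 := ⟨s ^ 2, h.symm⟩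
      exact (Nat.Coprime.dvd_of_dvd_mul_left (by norm_num) hd)
    obtain ⟨k1, rfl⟩ := h7k
    have hs2 : s ^ 2 = 28 * k1 ^ 2 := by nlinarith [h]
    have h7s : 7 ∣ s := by
      apply hp.dvd_of_dvd_pow (n := 2)
      exact ⟨4 * k1 ^ 2, by omega⟩
    obtain ⟨s1, rfl⟩ := h7s
    have hs1 : s1 ≠ 0 := by rintro rfl; simp at hs
    have hlt : s1 < 7 * s1 := by omega
    exact ih s1 hlt k1 hs1 (by nlinarith [hs2])

theorem no7 (k s : Int) (hs : 0 < s) : 4 * k ^ 2 ≠ 7 * s ^ 2 := by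
  intro h
  have hnat : 7 * (s.natAbs * s.natAbs) = 4 * (k.natAbs * k.natAbs) := by
    have hz : ((7 * (s.natAbs * s.natAbs) : ℕ) : ℤ) = ((4 * (k.natAbs * k.natAbs) : ℕ) : ℤ) := by
      push_cast
      rw [abs_mul_abs_self, abs_mul_abs_self]
      linear_combination -h
    exact_mod_cast hz
  exact no7nat s.natAbs k.natAbs (Int.natAbs_pos.mpr (by omega)).ne'
    (by rw [pow_two, pow_two]; exact hnat)

-- two long distances sharing a vertex are impossible (4·cross² = 7·s² has no solution)
theorem shared_contra (v x y : Int × Int) (s : Int) (hs : 0 < s)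
    (h1 : d2 v x = 2 * s) (h2 : d2 v y = 2 * s) (h3 : d2 x y = s) : False := by
  obtain ⟨v1, v2⟩ := v; obtain ⟨x1, x2⟩ := x; obtain ⟨y1, y2⟩ := y
  unfold d2 at h1 h2 h3
  simp only at h1 h2 h3
  apply no7 ((x1 - v1) * (y2 - v2) - (y1 - v1) * (x2 - v2)) s hs
  have hd : 2 * ((x1 - v1) * (y1 - v1) + (x2 - v2) * (y2 - v2)) = 3 * s := by
    linear_combination h1 + h2 - h3
  have key : 4 * ((x1 - v1) * (y2 - v2) - (y1 - v1) * (x2 - v2)) ^ 2 =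
      4 * (((x1 - v1) ^ 2 + (x2 - v2) ^ 2) * ((y1 - v1) ^ 2 + (y2 - v2) ^ 2)) -
      (2 * ((x1 - v1) * (y1 - v1) + (x2 - v2) * (y2 - v2))) ^ 2 := by ring
  rw [key, hd]
  have hx : (x1 - v1) ^ 2 + (x2 - v2) ^ 2 = 2 * s := by linear_combination h1
  have hy : (y1 - v1) ^ 2 + (y2 - v2) ^ 2 = 2 * s := by linear_combination h2
  rw [hx, hy]; ring

-- disjoint long pairs build a successful diagonal pairing
theorem disjoint_ok (p q r t : Int × Int) (s : Int) (hs : 0 < s)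
    (hpq : d2 p q = 2 * s) (hrt : d2 r t = 2 * s)
    (hpr : d2 p r = s) (hpt : d2 p t = s) (hqr : d2 q r = s) (hqt : d2 q t = s) :
    pvOk p q r t = true := by
  obtain ⟨p1, p2⟩ := p; obtain ⟨q1, q2⟩ := q; obtain ⟨r1, r2⟩ := r; obtain ⟨t1, t2⟩ := t
  unfold d2 at hpq hrt hpr hpt hqr hqt
  simp only at hpq hrt hpr hpt hqr hqt
  have hz : (q1 - r1 - t1 + p1) ^ 2 + (q2 - r2 - t2 + p2) ^ 2 = 0 := by
    linear_combination hpr + hpt + hqr + hqt - hpq - hrt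
  have hA := sq_nonneg (q1 - r1 - t1 + p1)
  have hB := sq_nonneg (q2 - r2 - t2 + p2)
  have e1 : q1 - r1 - t1 + p1 = 0 := by
    have : (q1 - r1 - t1 + p1) ^ 2 = 0 := by linarith
    exact pow_eq_zero_iff (two_ne_zero) |>.mp this
  have e2 : q2 - r2 - t2 + p2 = 0 := by
    have : (q2 - r2 - t2 + p2) ^ 2 = 0 := by linarith
    exact pow_eq_zero_iff (two_ne_zero) |>.mp this
  have hperp : (q1 - p1) * (t1 - r1) + (q2 - p2) * (t2 - r2) = 0 := by
    linear_combination (t1 - r1) * e1 + (t2 - r2) * e2 + hpt - hpr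
  have heq : (q1 - p1) * (q1 - p1) + (q2 - p2) * (q2 - p2) =
      (t1 - r1) * (t1 - r1) + (t2 - r2) * (t2 - r2) := by
    linear_combination hpq - hrt
  have hnz : ¬(q1 - p1 = 0 ∧ q2 - p2 = 0) := by
    rintro ⟨hz1, hz2⟩
    rw [hz1, hz2] at hpq
    simp at hpq
    omega
  unfold pvOk
  simp only [Bool.and_eq_true, beq_iff_eq, Bool.not_eq_true', Bool.and_eq_false_iff, beq_eq_false_iff_ne]
  refine ⟨⟨⟨⟨by omega, by omega⟩, hperp⟩, heq⟩, ?_⟩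
  by_cases h1 : q1 - p1 = 0
  · exact Or.inr (fun h2 => hnz ⟨h1, h2⟩)
  · exact Or.inl h1

-- a successful diagonal pairing forces the six-distance multiset {s,s,s,s,2s,2s}
theorem ok_dists (a b c d : Int × Int) (h : pvOk a b c d = true) :
    ∃ s : Int, 0 < s ∧ d2 a c = s ∧ d2 a d = s ∧ d2 b c = s ∧ d2 b d = s ∧
      d2 a b = 2 * s ∧ d2 c d = 2 * s := by
  obtain ⟨a1, a2⟩ := a; obtain ⟨b1, b2⟩ := b; obtain ⟨c1, c2⟩ := c; obtain ⟨d1, d2'⟩ := d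
  simp only [pvOk, Bool.and_eq_true, beq_iff_eq, Bool.not_eq_true', Bool.and_eq_false_iff,
    beq_eq_false_iff_ne] at h
  obtain ⟨⟨⟨⟨hm1, hm2⟩, hperp⟩, heq⟩, hnz⟩ := h
  have hb1 : b1 = c1 + d1 - a1 := by omega
  have hb2 : b2 = c2 + d2' - a2 := by omega
  subst hb1; subst hb2
  -- (c-a)·(d-a) = 0 from equal diagonal lengths
  have hx4 : 4 * ((c1 - a1) * (d1 - a1) + (c2 - a2) * (d2' - a2)) = 0 := by
    linear_combination heq
  have hx : (c1 - a1) * (d1 - a1) + (c2 - a2) * (d2' - a2) = 0 := by linarith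
  refine ⟨d2 (a1, a2) (c1, c2), ?_, rfl, ?_, ?_, ?_, ?_, ?_⟩
  · -- s > 0 from the non-degenerate diagonal
    have hu : c1 + d1 - a1 - a1 ≠ 0 ∨ c2 + d2' - a2 - a2 ≠ 0 := by
      rcases hnz with h1 | h2
      · exact Or.inl h1
      · exact Or.inr h2
    have hupos : 0 < (c1 + d1 - a1 - a1) * (c1 + d1 - a1 - a1) +
        (c2 + d2' - a2 - a2) * (c2 + d2' - a2 - a2) := by
      rcases hu with h1 | h2
      · have := mul_self_pos.mpr h1
        nlinarith [mul_self_nonneg (c2 + d2' - a2 - a2)]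
      · have := mul_self_pos.mpr h2
        nlinarith [mul_self_nonneg (c1 + d1 - a1 - a1)]
    -- |u|² = 2s
    unfold d2
    simp only
    nlinarith [hupos, hperp, hx]
  · unfold d2; simp only; linear_combination hperp
  · unfold d2; simp only; linear_combination hperp
  · unfold d2; simp only; ring
  · unfold d2; simp only; linear_combination hperp + 2 * hx
  · unfold d2; simp only; linear_combination hperp + 2 * hx - heq

-- evaluate the min/max/count check on a {s,s,s,s,2s,2s} list
theorem minmax_true (l : List Int) (s : Int) (hs : 0 < s) (hne : l ≠ [])
    (hmem : ∀ x ∈ l, x = s ∨ x = 2 * s)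
    (hc4 : List.count s l = 4) (hc2 : List.count (2 * s) l = 2) :
    (let m := (PySem.List.min? l (fun x => x)).getD 0
     let M := (PySem.List.max? l (fun x => x)).getD 0
     decide (m > 0) && (M == 2 * m) &&
       (PySem.List.count l m == 4) && (PySem.List.count l M == 2)) = true := by
  obtain ⟨m, hm⟩ : ∃ m, PySem.List.min? l (fun x => x) = some m := by
    cases hmm : PySem.List.min? l (fun x => x) with
    | none => exact absurd ((PySem.List.min?_eq_none_iff _ _).mp hmm) hne
    | some m => exact ⟨m, rfl⟩
  obtain ⟨M, hM⟩ : ∃ M, PySem.List.max? l (fun x => x) = some M := by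
    cases hmm : PySem.List.max? l (fun x => x) with
    | none => exact absurd ((PySem.List.max?_eq_none_iff _ _).mp hmm) hne
    | some M => exact ⟨M, rfl⟩
  have hsl : s ∈ l := List.count_pos_iff.mp (by omega)
  have h2sl : (2 * s) ∈ l := List.count_pos_iff.mp (by omega)
  have hms : m = s := by
    have h1 : m ≤ s := PySem.List.min?_isMin hm s hsl
    rcases hmem m (PySem.List.min?_mem hm) with h | h <;> omega
  have hM2s : M = 2 * s := by
    have h1 : 2 * s ≤ M := PySem.List.max?_isMax hM (2 * s) h2sl
    rcases hmem M (PySem.List.max?_mem hM) with h | h <;> omega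
  rw [hm, hM]
  simp only [Option.getD_some, hms, hM2s, Bool.and_eq_true, beq_iff_eq, decide_eq_true_eq,
    PySem.List.count_eq]
  exact ⟨⟨⟨hs, trivial⟩, hc4⟩, hc2⟩

-- counts of two distinct values sum to at most the length
theorem count_two_le {l : List Int} {a b : Int} (hab : a ≠ b) :
    List.count a l + List.count b l ≤ l.length := by
  induction l with
  | nil => simp
  | cons y ys ih =>
    simp only [List.count_cons, List.length_cons, beq_iff_eq]
    split_ifs <;> omega

-- every element of a list counted fully by two distinct values is one of them
theorem mem_of_counts {l : List Int} {a b : Int} (hab : a ≠ b)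
    (h : List.count a l + List.count b l = l.length) :
    ∀ x ∈ l, x = a ∨ x = b := by
  induction l with
  | nil => intro x hx; simp at hx
  | cons y ys ih =>
    intro x hx
    have hle := count_two_le (l := ys) hab
    simp only [List.count_cons, List.length_cons, beq_iff_eq] at h
    rcases List.mem_cons.mp hx with rfl | hx'
    · by_contra hne
      rcases not_or.mp hne with ⟨hna, hnb⟩
      rw [if_neg hna, if_neg hnb] at h
      omega
    · refine ih ?_ x hx'
      split_ifs at h <;> omega

theorem alt_ne4 (points : List (Int × Int)) (h : points.length ≠ 4) :
    is_valid_square_py_alt points = false := by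
  match points with
  | [] => rfl
  | [_] => rfl
  | [_, _] => rfl
  | [_, _, _] => rfl
  | [_, _, _, _] => exact absurd rfl h
  | _ :: _ :: _ :: _ :: _ :: _ => rfl

-- the 4-point case: sorted-distance check = diagonal-pairing check
theorem main4 (p q r t : Int × Int) :
    is_valid_square_py [p, q, r, t] = is_valid_square_py_alt [p, q, r, t] := by
  have h6 : (pvDists [p, q, r, t]).length = 6 := rfl
  have hl : pvDists [p, q, r, t] = [d2 p q, d2 p r, d2 p t, d2 q r, d2 q t, d2 r t] := rfl
  have halt : is_valid_square_py_alt [p, q, r, t] =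
      (pvOk p q r t || pvOk p r q t || pvOk p t q r) := rfl
  unfold is_valid_square_py
  rw [core_check _ h6, halt, hl, Bool.eq_iff_iff]
  constructor
  · -- the min/max/count check forces a disjoint pair of long distances
    intro h
    obtain ⟨m, hm⟩ : ∃ m, PySem.List.min? [d2 p q, d2 p r, d2 p t, d2 q r, d2 q t, d2 r t]
        (fun x => x) = some m := by
      cases hmm : PySem.List.min? [d2 p q, d2 p r, d2 p t, d2 q r, d2 q t, d2 r t]
          (fun x => x) with
      | none => exact absurd ((PySem.List.min?_eq_none_iff _ _).mp hmm) (by simp)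
      | some m => exact ⟨m, rfl⟩
    obtain ⟨M, hM⟩ : ∃ M, PySem.List.max? [d2 p q, d2 p r, d2 p t, d2 q r, d2 q t, d2 r t]
        (fun x => x) = some M := by
      cases hmm : PySem.List.max? [d2 p q, d2 p r, d2 p t, d2 q r, d2 q t, d2 r t]
          (fun x => x) with
      | none => exact absurd ((PySem.List.max?_eq_none_iff _ _).mp hmm) (by simp)
      | some M => exact ⟨M, rfl⟩
    rw [hm, hM] at h
    simp only [Option.getD_some, Bool.and_eq_true, beq_iff_eq, decide_eq_true_eq,
      PySem.List.count_eq] at h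
    obtain ⟨⟨⟨hm0, hM2⟩, hc4⟩, hc2⟩ := h
    rw [hM2] at hc2
    have htot : List.count m [d2 p q, d2 p r, d2 p t, d2 q r, d2 q t, d2 r t] +
        List.count (2 * m) [d2 p q, d2 p r, d2 p t, d2 q r, d2 q t, d2 r t] =
        ([d2 p q, d2 p r, d2 p t, d2 q r, d2 q t, d2 r t] : List Int).length := by
      simp only [List.length_cons, List.length_nil]
      omega
    have hmem := mem_of_counts (show m ≠ 2 * m by omega) htot
    have h1 : d2 p q = m ∨ d2 p q = 2 * m := hmem _ (by simp)
    have h2 : d2 p r = m ∨ d2 p r = 2 * m := hmem _ (by simp)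
    have h3 : d2 p t = m ∨ d2 p t = 2 * m := hmem _ (by simp)
    have h4 : d2 q r = m ∨ d2 q r = 2 * m := hmem _ (by simp)
    have h5 : d2 q t = m ∨ d2 q t = 2 * m := hmem _ (by simp)
    have h6' : d2 r t = m ∨ d2 r t = 2 * m := hmem _ (by simp)
    have hne2 : ¬((2 : Int) * m = m) := by omega
    have hne2' : ¬(m = 2 * m) := by omega
    simp only [Bool.or_eq_true]
    rcases h1 with h1 | h1 <;> rcases h2 with h2 | h2 <;> rcases h3 with h3 | h3 <;>
      rcases h4 with h4 | h4 <;> rcases h5 with h5 | h5 <;> rcases h6' with h6' | h6' <;>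
      first
        | exact Or.inl (Or.inl (disjoint_ok p q r t m hm0 h1 h6' h2 h3 h4 h5))
        | exact Or.inl (Or.inr (disjoint_ok p r q t m hm0 h2 h5 h1 h3
            ((d2_comm r q).trans h4) h6'))
        | exact Or.inr (disjoint_ok p t q r m hm0 h3 h4 h1 h2
            ((d2_comm t q).trans h5) ((d2_comm t r).trans h6'))
        | exact (shared_contra p q r m hm0 h1 h2 h4).elim
        | exact (shared_contra p q t m hm0 h1 h3 h5).elim
        | exact (shared_contra p r t m hm0 h2 h3 h6').elim
        | exact (shared_contra q p r m hm0 ((d2_comm q p).trans h1) h4 h2).elim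
        | exact (shared_contra q p t m hm0 ((d2_comm q p).trans h1) h5 h3).elim
        | exact (shared_contra q r t m hm0 h4 h5 h6').elim
        | exact (shared_contra r p q m hm0 ((d2_comm r p).trans h2)
            ((d2_comm r q).trans h4) h1).elim
        | exact (shared_contra r p t m hm0 ((d2_comm r p).trans h2) h6' h3).elim
        | exact (shared_contra r q t m hm0 ((d2_comm r q).trans h4) h6' h5).elim
        | exact (shared_contra t p q m hm0 ((d2_comm t p).trans h3)
            ((d2_comm t q).trans h5) h1).elim
        | exact (shared_contra t p r m hm0 ((d2_comm t p).trans h3)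
            ((d2_comm t r).trans h6') h2).elim
        | exact (shared_contra t q r m hm0 ((d2_comm t q).trans h5)
            ((d2_comm t r).trans h6') h4).elim
        | (exfalso; rw [h1, h2, h3, h4, h5, h6'] at hc2;
           simp [hne2, hne2'] at hc2)
  · -- a successful pairing yields the {s,s,s,s,2s,2s} histogram
    intro h
    simp only [Bool.or_eq_true] at h
    rcases h with (h1 | h2) | h3
    · obtain ⟨s, hs, hac, had, hbc, hbd, hab, hcd⟩ := ok_dists p q r t h1
      rw [hab, hac, had, hbc, hbd, hcd]
      refine minmax_true _ s hs (by simp) ?_ ?_ ?_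
      · intro x hx; simp at hx; rcases hx with h | h | h <;> omega
      · simp [(show ¬((2:Int) * s = s) by omega)]
      · simp [(show ¬(s = 2 * s) by omega)]
    · obtain ⟨s, hs, hac, had, hbc, hbd, hab, hcd⟩ := ok_dists p r q t h2
      rw [hac, hab, had, (d2_comm q r).trans hbc, hcd, hbd]
      refine minmax_true _ s hs (by simp) ?_ ?_ ?_
      · intro x hx; simp at hx; rcases hx with h | h | h <;> omega
      · simp [(show ¬((2:Int) * s = s) by omega)]
      · simp [(show ¬(s = 2 * s) by omega)]
    · obtain ⟨s, hs, hac, had, hbc, hbd, hab, hcd⟩ := ok_dists p t q r h3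
      rw [hac, had, hab, hcd, (d2_comm q t).trans hbc, (d2_comm r t).trans hbd]
      refine minmax_true _ s hs (by simp) ?_ ?_ ?_
      · intro x hx; simp at hx; rcases hx with h | h | h <;> omega
      · simp [(show ¬((2:Int) * s = s) by omega)]
      · simp [(show ¬(s = 2 * s) by omega)]

-- ===== VERDICT (by name: the statement is the Claim_ definition above) =====
theorem is_valid_square_py_spec : Claim_equal_is_valid_square_py := by
  intro points _
  show is_valid_square_py points = is_valid_square_py_alt points
  by_cases h4 : points.length = 4
  · rcases points with _ | ⟨p, _ | ⟨q, _ | ⟨r, _ | ⟨t, _ | ⟨u, rest⟩⟩⟩⟩⟩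
    · simp only [List.length_nil] at h4; omega
    · simp only [List.length_cons, List.length_nil] at h4; omega
    · simp only [List.length_cons, List.length_nil] at h4; omega
    · simp only [List.length_cons, List.length_nil] at h4; omega
    · exact main4 p q r t
    · simp only [List.length_cons] at h4; omega
  · rw [alt_ne4 points h4]
    have h6 : (pvDists points).length ≠ 6 := fun h => h4 ((pvDists_len6_iff points).mp h)
    unfold is_valid_square_py
    simp [h6, PySem.List.length_sorted]
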